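-- pv_equiv track=rewrite | github.com/asthalochan/PYTHON-ASSIGNMENT | q1.py | cow
-- ===== SOURCE A (Python) =====
-- def cow(list1,list2):
--     cow=0
--     for i in range (len(list1)):
--         for j in range(len(list1)):
--             if (list1[i] == list2[j]):
--                 if i!=j:
--                     cow+=1
--     return cow
-- ===== SOURCE B (Python) =====
-- def cow(list1, list2):
--     n = len(list1)
--     counts = {}
--     for v in list2[:n]:
--         counts[v] = counts.get(v, 0) + 1
--     total = sum(counts.get(v, 0) for v in list1)
--     same = sum(1 for a, b in zip(list1, list2) if a == b)
--     return total - same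
-- ===== Notes on version B (the rewrite author's own statement) =====
-- stated objective: faster
-- what changed: Replaced the quadratic nested index loops by one hash-counting pass: build a dict of value counts over list2[:len(list1)], sum the counts looked up for each element of list1, and subtract the same-index matches found with a single zip pass.
import Mathlib
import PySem

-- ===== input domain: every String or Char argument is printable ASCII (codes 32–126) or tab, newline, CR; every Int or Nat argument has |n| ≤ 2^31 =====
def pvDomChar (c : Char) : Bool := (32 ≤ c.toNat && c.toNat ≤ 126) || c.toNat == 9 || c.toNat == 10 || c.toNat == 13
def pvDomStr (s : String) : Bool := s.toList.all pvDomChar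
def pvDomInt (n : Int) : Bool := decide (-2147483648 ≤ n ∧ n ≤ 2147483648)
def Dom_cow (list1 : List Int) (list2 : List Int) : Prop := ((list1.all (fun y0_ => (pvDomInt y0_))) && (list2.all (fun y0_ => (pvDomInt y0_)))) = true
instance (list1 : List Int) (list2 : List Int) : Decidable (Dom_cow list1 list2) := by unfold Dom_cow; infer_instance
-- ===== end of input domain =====

-- B replaces A's quadratic nested index loops by one hash-counting pass (dict of counts
-- over list2[:len(list1)], one lookup per element of list1, minus a zip pass for the
-- same-index matches); a timing run measures the asymptotic speed-up.


-- ===== PORT A =====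
-- literal port of A: nested for-loops over range(len(list1)), indexing both lists
def cow (list1 : List Int) (list2 : List Int) : Int :=
  (PySem.List.pyRange 0 (list1.length : Int) 1).foldl (fun c i =>
    (PySem.List.pyRange 0 (list1.length : Int) 1).foldl (fun c j =>
      if PySem.List.pyGetD list1 i 0 = PySem.List.pyGetD list2 j 0 then
        (if i ≠ j then c + 1 else c)
      else c) c) 0

-- ===== PORT B =====
-- literal port of Source B: counting dict over list2[:n], one lookup per element of list1, zip pass for the diagonal
def cow_alt (list1 : List Int) (list2 : List Int) : Int :=
  let l2' := PySem.List.slice list2 none (some (list1.length : Int))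
  let counts := l2'.foldl (fun d v => d.insert v (d.getD v 0 + 1)) PySem.Dict.empty
  let total := list1.foldl (fun s v => s + counts.getD v 0) 0
  let same := (list1.zip list2).foldl (fun s p => if p.1 = p.2 then s + 1 else s) 0
  total - same

-- ===== PRECONDITION & SPEC =====
-- Pre_ excludes exactly the inputs where A raises IndexError: A indexes list2[j] for every j < len(list1)
def Pre_cow (list1 : List Int) (list2 : List Int) : Prop := list1.length ≤ list2.length
instance (list1 : List Int) (list2 : List Int) : Decidable (Pre_cow list1 list2) := by unfold Pre_cow; infer_instance
def pvWitness_cow : List Int × List Int := ([1, 2, 2], [2, 1, 2, 5])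

def Spec_cow (list1 : List Int) (list2 : List Int) (out : Int) : Prop := out = cow_alt list1 list2
instance (list1 : List Int) (list2 : List Int) (out : Int) : Decidable (Spec_cow list1 list2 out) := by unfold Spec_cow; infer_instance

-- ===== CLAIM (what is proved, stated in full; the proofs are below) =====
def Claim_equal_cow : Prop := ∀ (list1 : List Int) (list2 : List Int), Dom_cow list1 list2 → Pre_cow list1 list2 → Spec_cow list1 list2 (cow list1 list2)

-- ===== LEMMAS AND PROOFS =====

-- list-sum over range = Finset sum
theorem sum_map_range_int (f : Nat → Int) (n : Nat) :
    ((List.range n).map f).sum = ∑ i ∈ Finset.range n, f i := rfl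

theorem map_range_getD (l : List Int) :
    (List.range l.length).map (fun i => l.getD i 0) = l := by
  apply List.ext_getElem
  · simp
  · intro i h1 h2
    simp [List.getD_eq_getElem?_getD, List.getElem?_eq_getElem h2]

theorem count_range (a : Int) (l2 : List Int) (n : Nat) (h : n ≤ l2.length) :
    ∑ j ∈ Finset.range n, (if a = l2.getD j 0 then (1:Int) else 0)
      = ((l2.take n).count a : Int) := by
  induction n with
  | zero => simp
  | succ m ih =>
    have hm : m < l2.length := by omega
    have ht : l2.take (m+1) = l2.take m ++ [l2[m]] := by simpa using (List.take_concat_get (l := l2) (i := m) hm).symm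
    rw [Finset.sum_range_succ, ih (by omega), ht, List.count_append]
    push_cast
    simp [List.getD_eq_getElem, hm]
    split <;> simp_all [eq_comm]

theorem diag_zip (l1 : List Int) : ∀ (l2 : List Int), l1.length ≤ l2.length →
    ∑ i ∈ Finset.range l1.length, (if l1.getD i 0 = l2.getD i 0 then (1:Int) else 0)
      = ((l1.zip l2).countP (fun p => decide (p.1 = p.2)) : Int) := by
  induction l1 with
  | nil => simp
  | cons a l1' ih =>
    intro l2 h
    cases l2 with
    | nil => simp at h
    | cons b l2' =>
      rw [List.length_cons, Finset.sum_range_succ']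
      simp only [List.getD_cons_succ, List.getD_cons_zero, List.zip_cons_cons,
        List.countP_cons, ih l2' (by simpa using h)]
      split <;> simp_all [eq_comm] <;> push_cast <;> ring

theorem cow_eq_alt (l1 l2 : List Int) (h : l1.length ≤ l2.length) : cow l1 l2 = cow_alt l1 l2 := by
  unfold cow cow_alt
  simp only [PySem.List.slice_to_natCast, PySem.Dict.foldl_insert_getD_add_one_eq_counter,
    PySem.Dict.getD_counter, PySem.List.foldl_add, PySem.List.foldl_ite_add_one,
    PySem.List.pyRange_zero_nat, zero_add]
  set n := l1.length with hn
  have hbody : ∀ (i : Int), (fun (c : Int) (j : Nat) =>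
      if PySem.List.pyGetD l1 i 0 = PySem.List.pyGetD l2 (j:Int) 0 then if i ≠ (j:Int) then c + 1 else c else c)
      = fun (c : Int) (j : Nat) => c + (if PySem.List.pyGetD l1 i 0 = PySem.List.pyGetD l2 (j:Int) 0 ∧ i ≠ (j:Int) then (1:Int) else 0) := by
    intro i; funext c j; split_ifs <;> simp_all
  have hinner : ∀ (c : Int) (i : Int),
      List.foldl (fun c j => if PySem.List.pyGetD l1 i 0 = PySem.List.pyGetD l2 j 0 then if i ≠ j then c + 1 else c else c)
        c (List.map (fun k => ((k : Nat) : Int)) (List.range n))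
      = c + ∑ j ∈ Finset.range n, (if PySem.List.pyGetD l1 i 0 = PySem.List.pyGetD l2 ((j:Nat):Int) 0 ∧ i ≠ ((j:Nat):Int) then (1:Int) else 0) := by
    intro c i
    rw [List.foldl_map, hbody i, PySem.List.foldl_add, sum_map_range_int]
  have houter : (fun (c : Int) (i : Nat) =>
      List.foldl (fun c j => if PySem.List.pyGetD l1 ((i:Nat):Int) 0 = PySem.List.pyGetD l2 j 0 then if ((i:Nat):Int) ≠ j then c + 1 else c else c)
        c (List.map (fun k => ((k : Nat) : Int)) (List.range n)))
      = fun (c : Int) (i : Nat) => c + ∑ j ∈ Finset.range n, (if PySem.List.pyGetD l1 ((i:Nat):Int) 0 = PySem.List.pyGetD l2 ((j:Nat):Int) 0 ∧ ((i:Nat):Int) ≠ ((j:Nat):Int) then (1:Int) else 0) := by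
    funext c i; exact hinner c (i:Int)
  rw [List.foldl_map, houter, PySem.List.foldl_add, sum_map_range_int, zero_add]
  simp only [Function.comp, PySem.List.pyGetD_natCast, Nat.cast_inj, ne_eq, Nat.cast_injective.ne_iff]
  -- LHS: ∑ i ∈ range n, ∑ j ∈ range n, ite (l1.getD i 0 = l2.getD j 0 ∧ i ≠ j)
  have hsplit : ∀ i ∈ Finset.range n,
      (∑ j ∈ Finset.range n, (if l1.getD i 0 = l2.getD j 0 ∧ ¬ i = j then (1:Int) else 0))
      = ((l2.take n).count (l1.getD i 0) : Int) - (if l1.getD i 0 = l2.getD i 0 then (1:Int) else 0) := by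
    intro i hi
    have hpt : ∀ j, (if l1.getD i 0 = l2.getD j 0 ∧ ¬ i = j then (1:Int) else 0)
        = (if l1.getD i 0 = l2.getD j 0 then (1:Int) else 0)
          - (if i = j then (if l1.getD i 0 = l2.getD j 0 then (1:Int) else 0) else 0) := by
      intro j; by_cases hij : i = j <;> split_ifs <;> simp_all
    calc (∑ j ∈ Finset.range n, (if l1.getD i 0 = l2.getD j 0 ∧ ¬ i = j then (1:Int) else 0))
        = ∑ j ∈ Finset.range n, ((if l1.getD i 0 = l2.getD j 0 then (1:Int) else 0)
            - (if i = j then (if l1.getD i 0 = l2.getD j 0 then (1:Int) else 0) else 0)) := by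
          exact Finset.sum_congr rfl (fun j _ => hpt j)
      _ = ((l2.take n).count (l1.getD i 0) : Int) - (if l1.getD i 0 = l2.getD i 0 then (1:Int) else 0) := by
          rw [Finset.sum_sub_distrib, count_range _ _ _ h, Finset.sum_ite_eq, if_pos hi]
  rw [Finset.sum_congr rfl hsplit, Finset.sum_sub_distrib, diag_zip l1 l2 h]
  congr 1
  conv_rhs => rw [← map_range_getD l1]
  rw [List.map_map, sum_map_range_int]
  rfl


-- ===== VERDICT (by name: the statement is the Claim_ definition above) =====
theorem cow_spec : Claim_equal_cow := by
  intro l1 l2 _ hpre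
  unfold Spec_cow
  exact cow_eq_alt l1 l2 hpre
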